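-- pv_equiv track=rewrite | github.com/tmadlener/chib_chic_polFW | python/utils/reporting.py | create_figure
-- ===== SOURCE A (Python) =====
-- PLOT_COMMAND = r'\includegraphics[width=0.5\linewidth]'
--
-- MAX_FIG_P_PAGE = 6
--
-- def create_subfloat(plot, label):
--     """
--     Create a subfloat entry
--     """
--     return (r'\subfloat[][LABEL]{PLTCMD{PLOT}}'
--             .replace('LABEL', label).replace('PLOT', plot)
--             .replace('PLTCMD', PLOT_COMMAND))
--
-- def create_figure(plots):
--     """
--     Make the latex figure
--     """
--     ret_str = []
--
--     fig_started = False
--     for iplot, (label, pname) in enumerate(plots.items()):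
--         if iplot % MAX_FIG_P_PAGE == 0:
--             if fig_started:
--                 ret_str.append(r'\end{figure}')
--                 ret_str.append('')
--                 fig_started = False
--             if not fig_started:
--                 ret_str.append(r'\begin{figure}')
--                 ret_str.append('')
--                 fig_started = True
--
--         ret_str.append(create_subfloat(pname, label))
--
--         if iplot % 2 != 0:
--             ret_str.append('')
--
--     if fig_started:
--         ret_str.append(r'\end{figure}')
--
--     return '\n'.join(ret_str)
-- ===== SOURCE B (Python) =====
-- PLOT_COMMAND = r'\includegraphics[width=0.5\linewidth]'
--
-- MAX_FIG_P_PAGE = 6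
--
--
-- def create_subfloat(plot, label):
--     """
--     Create a subfloat entry
--     """
--     return (r'\subfloat[][LABEL]{PLTCMD{PLOT}}'
--             .replace('LABEL', label).replace('PLOT', plot)
--             .replace('PLTCMD', PLOT_COMMAND))
--
--
-- def _chunks(items):
--     """Split items into consecutive chunks of MAX_FIG_P_PAGE."""
--     if not items:
--         return []
--     return [items[:MAX_FIG_P_PAGE]] + _chunks(items[MAX_FIG_P_PAGE:])
--
--
-- def _block_body(chunk, i=0):
--     """Subfloat lines of one figure, a blank line after every odd index."""
--     if not chunk:
--         return []
--     label, pname = chunk[0]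
--     entry = [create_subfloat(pname, label)]
--     if i % 2 != 0:
--         entry.append('')
--     return entry + _block_body(chunk[1:], i + 1)
--
--
-- def _join_blocks(blocks):
--     """Concatenate figure blocks with one blank line between consecutive ones."""
--     if not blocks:
--         return []
--     if len(blocks) == 1:
--         return blocks[0]
--     return blocks[0] + [''] + _join_blocks(blocks[1:])
--
--
-- def create_figure(plots):
--     """
--     Make the latex figure (chunk-based recursive decomposition)
--     """
--     blocks = [[r'\begin{figure}', ''] + _block_body(chunk) + [r'\end{figure}']
--               for chunk in _chunks(list(plots.items()))]
--     return '\n'.join(_join_blocks(blocks))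
-- ===== Notes on version B (the rewrite author's own statement) =====
-- stated objective: alternative
-- what changed: Replaced A's single stateful loop with a fig_started flag and in-loop page-break bookkeeping by a recursive chunk-of-6 decomposition: partition the items, render each chunk as a self-contained figure block, and join the blocks with one blank separator line.
import Mathlib
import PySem

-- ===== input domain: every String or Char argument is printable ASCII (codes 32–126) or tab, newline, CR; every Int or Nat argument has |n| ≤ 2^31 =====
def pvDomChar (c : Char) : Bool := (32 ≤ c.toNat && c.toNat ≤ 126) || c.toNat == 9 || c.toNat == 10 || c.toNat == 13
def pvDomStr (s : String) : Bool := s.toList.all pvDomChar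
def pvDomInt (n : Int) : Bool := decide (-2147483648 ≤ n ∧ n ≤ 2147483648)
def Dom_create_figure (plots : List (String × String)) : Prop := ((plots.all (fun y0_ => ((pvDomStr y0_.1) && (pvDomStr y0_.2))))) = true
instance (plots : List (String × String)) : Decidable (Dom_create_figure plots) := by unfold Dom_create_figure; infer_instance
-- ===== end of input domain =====

-- B replaces A's stateful loop (fig_started flag) by a recursive chunk-of-6 decomposition
-- joining self-contained figure blocks; alternative decomposition of the same cost.

-- ===== PORT A =====
def PLOT_COMMAND : String := "\\includegraphics[width=0.5\\linewidth]"

-- helper used by both Pythons (identical definition in Source A and Source B)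
def create_subfloat (plot label : String) : String :=
  PySem.Str.replace
    (PySem.Str.replace
      (PySem.Str.replace "\\subfloat[][LABEL]{PLTCMD{PLOT}}" "LABEL" label)
      "PLOT" plot)
    "PLTCMD" PLOT_COMMAND

-- the enumerate index iplot is a nonnegative int, so Nat % is exactly Python's % here
def afLoop : List (String × String) → Nat → List String → Bool → List String × Bool
  | [], _, ret, started => (ret, started)
  | (label, pname) :: rest, iplot, ret, started =>
    let rs :=
      if iplot % 6 = 0 then
        let rs1 := if started then (ret ++ ["\\end{figure}", ""], false) else (ret, started)
        if rs1.2 = false then (rs1.1 ++ ["\\begin{figure}", ""], true) else rs1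
      else (ret, started)
    let ret2 := rs.1 ++ [create_subfloat pname label]
    let ret3 := if iplot % 2 ≠ 0 then ret2 ++ [""] else ret2
    afLoop rest (iplot + 1) ret3 rs.2

def create_figure (plots : List (String × String)) : String :=
  let rs := afLoop plots 0 [] false
  PySem.Str.join "\n" (if rs.2 then rs.1 ++ ["\\end{figure}"] else rs.1)

-- ===== PORT B =====
-- items[:6] / items[6:] with literal nonnegative bounds are exactly take 6 / drop 6
def bChunks (items : List (String × String)) : List (List (String × String)) :=
  if items = [] then []
  else items.take 6 :: bChunks (items.drop 6)
termination_by items.length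
decreasing_by
  simp only [List.length_drop]
  cases items with
  | nil => simp_all
  | cons x t => simp

def bBlockBody : List (String × String) → Nat → List String
  | [], _ => []
  | (label, pname) :: rest, i =>
    (create_subfloat pname label :: (if i % 2 ≠ 0 then [""] else [])) ++ bBlockBody rest (i + 1)

def bJoinBlocks : List (List String) → List String
  | [] => []
  | [b] => b
  | b :: rest => b ++ [""] ++ bJoinBlocks rest

def bBlock (chunk : List (String × String)) : List String :=
  ["\\begin{figure}", ""] ++ bBlockBody chunk 0 ++ ["\\end{figure}"]

def create_figure_alt (plots : List (String × String)) : String :=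
  PySem.Str.join "\n" (bJoinBlocks ((bChunks plots).map bBlock))

-- ===== PRECONDITION & SPEC =====
def Spec_create_figure (plots : List (String × String)) (out : String) : Prop := out = create_figure_alt plots
instance (plots : List (String × String)) (out : String) : Decidable (Spec_create_figure plots out) := by unfold Spec_create_figure; infer_instance

-- ===== CLAIM (what is proved, stated in full; the proofs are below) =====
def Claim_equal_create_figure : Prop := ∀ (plots : List (String × String)), Dom_create_figure plots → Spec_create_figure plots (create_figure plots)

-- ===== LEMMAS AND PROOFS =====

-- processing elements that stay inside the current figure page (indices 6m+j … with j ≥ 1, fitting below the next multiple of 6)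
lemma afLoop_inside (ys : List (String × String)) :
    ∀ (zs : List (String × String)) (m j : Nat) (acc : List String),
      1 ≤ j → j + ys.length ≤ 6 →
      afLoop (ys ++ zs) (6 * m + j) acc true
        = afLoop zs (6 * m + (j + ys.length)) (acc ++ bBlockBody ys j) true := by
  induction ys with
  | nil => intro zs m j acc _ _; simp [bBlockBody]
  | cons y t ih =>
    intro zs m j acc hj hle
    obtain ⟨label, pname⟩ := y
    simp only [List.length_cons] at hle
    have h6 : (6 * m + j) % 6 ≠ 0 := by omega
    have h2 : (6 * m + j) % 2 = j % 2 := by omega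
    simp only [List.cons_append, afLoop, if_neg h6, h2]
    have : 6 * m + j + 1 = 6 * m + (j + 1) := by ring
    rw [this, ih zs m (j + 1) _ (by omega) (by omega),
      show 6 * m + (j + 1 + t.length) = 6 * m + (j + (t.length + 1)) from by omega]
    simp only [bBlockBody]
    by_cases hp : j % 2 ≠ 0 <;> simp [hp, List.append_assoc]

-- at a page boundary with a figure open, closing it first is the same as restarting from a fresh state
lemma afLoop_restart (y : String × String) (r : List (String × String)) (k : Nat)
    (acc : List String) :
    afLoop (y :: r) (6 * k) acc true
      = afLoop (y :: r) (6 * k) (acc ++ ["\\end{figure}", ""]) false := by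
  obtain ⟨label, pname⟩ := y
  simp [afLoop, Nat.mul_mod_right]

lemma bChunks_cons (xs : List (String × String)) (h : xs ≠ []) :
    bChunks xs = xs.take 6 :: bChunks (xs.drop 6) := by
  rw [bChunks]; simp [h]

-- main invariant: starting a fresh figure at any multiple of 6 produces exactly B's blocks
lemma afLoop_main (n : Nat) :
    ∀ (xs : List (String × String)) (m : Nat) (acc : List String),
      xs.length ≤ n → xs ≠ [] →
      (if (afLoop xs (6 * m) acc false).2 then (afLoop xs (6 * m) acc false).1 ++ ["\\end{figure}"]
       else (afLoop xs (6 * m) acc false).1)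
        = acc ++ bJoinBlocks ((bChunks xs).map bBlock) := by
  induction n with
  | zero => intro xs _ _ hn hne; cases xs <;> simp_all
  | succ n ih =>
    intro xs m acc hn hne
    obtain ⟨⟨label, pname⟩, t, hxs⟩ := List.exists_cons_of_ne_nil hne
    subst hxs
    have h2 : (6 * m) % 2 = 0 := by omega
    simp only [afLoop]
    simp only [Nat.mul_mod_right, h2, Bool.false_eq_true, ne_eq,
      not_true_eq_false, not_false_eq_true, if_neg, if_pos]
    have hsplit : t = t.take 5 ++ t.drop 5 := (List.take_append_drop 5 t).symm
    conv_lhs => rw [hsplit]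
    rw [afLoop_inside (t.take 5) (t.drop 5) m 1 _
          (by omega) (by simp [List.length_take]; omega)]
    by_cases hd : t.drop 5 = []
    · -- single (possibly short) chunk
      have hle5 : t.length ≤ 5 := by rw [List.drop_eq_nil_iff] at hd; omega
      have htake : t.take 5 = t := List.take_of_length_le hle5
      rw [hd, htake]
      simp only [afLoop]
      rw [bChunks_cons ((label, pname) :: t) (by simp),
          show ((label, pname) :: t).drop 6 = [] by
            rw [List.drop_eq_nil_iff]; simp; omega,
          show ((label, pname) :: t).take 6 = (label, pname) :: t by
            apply List.take_of_length_le; simp; omega]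
      simp [bChunks, bJoinBlocks, bBlock, bBlockBody]
    · -- a full chunk of 6 followed by more
      have hlen5 : 5 ≤ t.length := by
        by_contra h
        exact hd (by rw [List.drop_eq_nil_iff]; omega)
      have htk : (t.take 5).length = 5 := by
        rw [List.length_take]; omega
      rw [htk]
      obtain ⟨z, zs, hz⟩ := List.exists_cons_of_ne_nil hd
      have harr : 6 * m + (1 + 5) = 6 * (m + 1) := by ring
      rw [hz, harr, afLoop_restart]
      rw [← hz]
      have hlt : (t.drop 5).length ≤ n := by
        simp only [List.length_drop]
        have := hn; simp at this; omega
      rw [ih (t.drop 5) (m + 1) _ hlt hd]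
      rw [bChunks_cons ((label, pname) :: t) (by simp),
          show ((label, pname) :: t).drop 6 = t.drop 5 from rfl,
          show ((label, pname) :: t).take 6 = (label, pname) :: t.take 5 from rfl]
      rw [bChunks_cons (t.drop 5) hd]
      simp [bJoinBlocks, bBlock, bBlockBody, List.append_assoc]

-- ===== VERDICT (by name: the statement is the Claim_ definition above) =====
theorem create_figure_spec : Claim_equal_create_figure := by
  intro plots _
  unfold Spec_create_figure create_figure create_figure_alt
  by_cases h : plots = []
  · subst h; simp [afLoop, bChunks, bJoinBlocks]
  · show PySem.Str.join "\n"
        (if (afLoop plots 0 [] false).2 then (afLoop plots 0 [] false).1 ++ ["\\end{figure}"]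
         else (afLoop plots 0 [] false).1) = _
    have hm := afLoop_main plots.length plots 0 [] le_rfl h
    simp only [Nat.mul_zero] at hm
    rw [hm]
    simp
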